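-- pv_equiv track=rewrite | github.com/RoyNijhuis/Project-MOD07 | distance.py | comparelists2
-- ===== SOURCE A (Python) =====
-- def comparelists2(list1, list2):
--     list2copy = list2[:]
--     biject = False
--     for li in list1:
--         found = False
--         for l2 in list2copy:
--             boole = li == l2
--             if boole and not found:
--                 list2copy.remove(l2)
--                 found = True
--                 if biject:
--                     break
--             elif boole and found and not biject:
--                 biject = True
--         if not found:
--             return 0
--     result = 1
--     if biject:
--         result = 2
--     return result
-- ===== SOURCE B (Python) =====
-- def comparelists2(list1, list2):
--     if any(list2.count(x) < list1.count(x) for x in list1):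
--         return 0
--     return 2 if any(list2.count(x) >= 2 for x in list1) else 1
-- ===== Notes on version B (the rewrite author's own statement) =====
-- stated objective: simpler
-- what changed: B replaces A's stateful copy-and-remove scan (a list mutated with remove() while it is being iterated, plus found/biject flags) by two stateless frequency tests: a count comparison per list1 value decides the 0 case and a count>=2 test decides 1 vs 2.
-- intended difference: On inputs where list1 is a sub-multiset of list2, some list1 value is duplicated in list2, and every such value occurs exactly twice with everything strictly between its two occurrences consumed by earlier list1 elements, A's remove()-while-iterating scan skips the surviving duplicate and returns 1; B returns 2, the intended 'some list1 value occurs at least twice in list2' answer. — e.g. on comparelists2([1], [1, 1]): A returns 1, B returns 2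
import Mathlib
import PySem

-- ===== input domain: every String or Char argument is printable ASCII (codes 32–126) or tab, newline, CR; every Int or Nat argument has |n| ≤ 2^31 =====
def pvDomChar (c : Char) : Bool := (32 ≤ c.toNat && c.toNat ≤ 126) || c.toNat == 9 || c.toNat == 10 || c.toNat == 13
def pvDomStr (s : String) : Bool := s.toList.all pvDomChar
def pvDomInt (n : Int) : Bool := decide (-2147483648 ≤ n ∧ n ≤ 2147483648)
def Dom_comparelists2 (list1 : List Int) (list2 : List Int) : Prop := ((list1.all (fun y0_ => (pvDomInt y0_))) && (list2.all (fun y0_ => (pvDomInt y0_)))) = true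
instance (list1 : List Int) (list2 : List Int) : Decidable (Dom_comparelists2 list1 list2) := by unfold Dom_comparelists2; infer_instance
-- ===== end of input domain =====

-- B replaces A's stateful copy-and-remove scan by two stateless count tests
-- (simpler); on the exceptional inputs described at D_ below A's scan misses a
-- duplicate and the two differ, as stated and proved.

-- ===== PORT A =====
-- helper cited by the port's decreasing_by: remove() never lengthens the list
theorem pvRemoveGetDLenLe (xs : List Int) (v : Int) :
    ((PySem.List.remove? xs v).getD xs).length ≤ xs.length := by
  cases hr : PySem.List.remove? xs v with
  | none => simp
  | some r =>
    have hv : v ∈ xs := by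
      by_contra hv
      rw [(PySem.List.remove?_eq_none_iff xs v).mpr hv] at hr
      cases hr
    rw [PySem.List.remove?_eq_some_erase xs v hv] at hr
    cases hr
    simpa using (List.erase_sublist (l := xs) (a := v)).length_le

-- inner 'for l2 in list2copy' loop of A: the list is mutated by remove() while it is
-- being iterated, so we port CPython's cursor semantics exactly: the cursor j advances
-- by one each iteration over the CURRENT list (after a remove() at the cursor this
-- skips the element that slid into the next slot).
def cl2Inner (li : Int) (copy : List Int) (j : Nat) (found biject : Bool) :
    List Int × Bool × Bool :=
  if h : j < copy.length then
    let l2 := copy[j]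
    let boole := li == l2
    if boole && !found then
      -- list2copy.remove(l2): l2 is in the list here, getD is never taken
      let copy' := (PySem.List.remove? copy l2).getD copy
      if biject then (copy', true, biject)
      else cl2Inner li copy' (j+1) true biject
    else if boole && found && !biject then
      cl2Inner li copy (j+1) found true
    else
      cl2Inner li copy (j+1) found biject
  else (copy, found, biject)
termination_by copy.length - j
decreasing_by
  · have := pvRemoveGetDLenLe copy copy[j]
    omega
  · omega
  · omega

def cl2Outer (list1 : List Int) (copy : List Int) (biject : Bool) : Int :=
  match list1 with
  | [] => if biject then 2 else 1   -- result = 1; if biject: result = 2; return result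
  | li :: rest =>
    let r := cl2Inner li copy 0 false biject
    if !r.2.1 then 0
    else cl2Outer rest r.1 r.2.2

def comparelists2 (list1 : List Int) (list2 : List Int) : Int :=
  cl2Outer list1 list2 false   -- list2copy = list2[:] (a copy; lists are immutable here)

-- ===== PORT B =====
def comparelists2_alt (list1 : List Int) (list2 : List Int) : Int :=
  -- if any(list2.count(x) < list1.count(x) for x in list1): return 0
  if list1.any (fun x => decide (list2.count x < list1.count x)) then 0
  -- return 2 if any(list2.count(x) >= 2 for x in list1) else 1
  else if list1.any (fun x => decide (2 ≤ list2.count x)) then 2 else 1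

-- ===== PRECONDITION & SPEC =====
-- On inputs where list1 is a sub-multiset of list2, some list1 value is duplicated in
-- list2, and every such value occurs exactly twice with everything strictly between its
-- two occurrences in list2 already consumed by the part of list1 before that value, A's
-- remove()-while-iterating scan skips the surviving duplicate and returns 1; B returns
-- 2, the intended 'some list1 value occurs at least twice in list2' answer.
def D_comparelists2 (list1 : List Int) (list2 : List Int) : Prop :=
  (∀ x ∈ list1, list1.count x ≤ list2.count x) ∧
  (∃ x ∈ list1, 2 ≤ list2.count x) ∧
  (∀ x ∈ list1, 2 ≤ list2.count x → list2.count x = 2 ∧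
    ∀ t ∈ List.range list2.length, (list2.take t).count x = 1 → list2.getD t 0 ≠ x →
      (list2.take (t+1)).count (list2.getD t 0)
        ≤ (list1.take (list1.idxOf x)).count (list2.getD t 0))
instance (list1 : List Int) (list2 : List Int) : Decidable (D_comparelists2 list1 list2) := by
  unfold D_comparelists2
  infer_instance

def Spec_comparelists2 (list1 : List Int) (list2 : List Int) (out : Int) : Prop :=
  ¬ D_comparelists2 list1 list2 → out = comparelists2_alt list1 list2
instance (list1 : List Int) (list2 : List Int) (out : Int) : Decidable (Spec_comparelists2 list1 list2 out) := by
  unfold Spec_comparelists2; infer_instance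

def pvDiffWitness_comparelists2 : List Int × List Int := ([1], [1, 1])
def pvDiffWitnessOut_comparelists2 : Int × Int := (1, 2)

-- ===== CLAIM (what is proved, stated in full; the proofs are below) =====
def Claim_unchanged_comparelists2 : Prop := ∀ (list1 : List Int) (list2 : List Int), Dom_comparelists2 list1 list2 → Spec_comparelists2 list1 list2 (comparelists2 list1 list2)
def Claim_changed_comparelists2 : Prop := Dom_comparelists2 (pvDiffWitness_comparelists2.1) (pvDiffWitness_comparelists2.2) ∧ D_comparelists2 (pvDiffWitness_comparelists2.1) (pvDiffWitness_comparelists2.2) ∧ comparelists2 (pvDiffWitness_comparelists2.1) (pvDiffWitness_comparelists2.2) = pvDiffWitnessOut_comparelists2.1 ∧ comparelists2_alt (pvDiffWitness_comparelists2.1) (pvDiffWitness_comparelists2.2) = pvDiffWitnessOut_comparelists2.2 ∧ pvDiffWitnessOut_comparelists2.1 ≠ pvDiffWitnessOut_comparelists2.2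
def Claim_exact_comparelists2 : Prop := ∀ (list1 : List Int) (list2 : List Int), Dom_comparelists2 list1 list2 → D_comparelists2 list1 list2 → comparelists2 list1 list2 ≠ comparelists2_alt list1 list2

-- ===== LEMMAS AND PROOFS =====

-- clean recursive characterisation of A's outer loop
def cl2S : List Int → List Int → Bool → Int
  | [], _, b => if b then 2 else 1
  | li :: rest, copy, b =>
    if li ∈ copy then
      cl2S rest (copy.erase li) (b || decide (li ∈ copy.drop (copy.idxOf li + 2)))
    else 0

theorem pvDropApp (as rest : List Int) (k : Nat) :
    (as ++ rest).drop (as.length + k) = rest.drop k := by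
  induction as with
  | nil => simp
  | cons a t ih =>
    rw [List.cons_append, List.length_cons,
      show t.length + 1 + k = (t.length + k) + 1 from by omega,
      List.drop_succ_cons, ih]

theorem pvIdxOf_eq (li : Int) (copy : List Int) (j : Nat) (hj : j < copy.length)
    (ht : li ∉ copy.take j) (he : copy[j] = li) : copy.idxOf li = j := by
  induction copy generalizing j with
  | nil => simp at hj
  | cons a t ih =>
    cases j with
    | zero =>
      simp at he
      subst he
      exact List.idxOf_cons_self
    | succ j' =>
      simp only [List.take_succ_cons, List.mem_cons, not_or] at ht
      have hane : a ≠ li := fun hh => ht.1 hh.symm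
      rw [List.idxOf_cons_ne _ hane,
        ih j' (by simpa using hj) ht.2 (by simpa using he)]

-- A's inner loop after the match was removed: it only scans for a second equal element
theorem cl2Inner_found (li : Int) (copy : List Int) :
    ∀ j b, cl2Inner li copy j true b = (copy, true, b || decide (li ∈ copy.drop j)) := by
  suffices H : ∀ n j b, copy.length ≤ j + n →
      cl2Inner li copy j true b = (copy, true, b || decide (li ∈ copy.drop j)) from
    fun j b => H copy.length j b (by omega)
  intro n
  induction n with
  | zero =>
    intro j b h
    rw [cl2Inner, dif_neg (by omega), List.drop_eq_nil_of_le (by omega)]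
    simp
  | succ n ih =>
    intro j b h
    by_cases hj : j < copy.length
    · rw [cl2Inner, dif_pos hj]
      have ih' : ∀ b', cl2Inner li copy (j+1) true b' =
          (copy, true, b' || decide (li ∈ copy.drop (j+1))) :=
        fun b' => ih (j+1) b' (by omega)
      have hdrop : copy.drop j = copy[j] :: copy.drop (j+1) := List.drop_eq_getElem_cons hj
      cases hbe : (li == copy[j]) with
      | false =>
        have hne : li ≠ copy[j] := by simpa using hbe
        have hmem2 : (li ∈ copy.drop j) ↔ (li ∈ copy.drop (j+1)) := by
          rw [hdrop, List.mem_cons]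
          exact or_iff_right hne
        simp only [Bool.not_true, Bool.and_false, Bool.false_eq_true, if_false, hbe,
          Bool.false_and]
        rw [ih']
        simp [hmem2]
      | true =>
        have heq : li = copy[j] := by simpa using hbe
        cases hb2 : b <;> simp [hbe, ih', hdrop, ← heq]
    · rw [cl2Inner, dif_neg hj, List.drop_eq_nil_of_le (by omega)]
      simp

-- A's inner loop from scratch
theorem cl2Inner_char (li : Int) (copy : List Int) :
    ∀ j b, li ∉ copy.take j →
      cl2Inner li copy j false b =
        if li ∈ copy then
          (copy.erase li, true, b || decide (li ∈ copy.drop (copy.idxOf li + 2)))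
        else (copy, false, b) := by
  suffices H : ∀ n j b, copy.length ≤ j + n → li ∉ copy.take j →
      cl2Inner li copy j false b =
        if li ∈ copy then
          (copy.erase li, true, b || decide (li ∈ copy.drop (copy.idxOf li + 2)))
        else (copy, false, b) from
    fun j b ht => H copy.length j b (by omega) ht
  intro n
  induction n with
  | zero =>
    intro j b h ht
    rw [List.take_of_length_le (by omega)] at ht
    rw [cl2Inner, dif_neg (by omega), if_neg ht]
  | succ n ih =>
    intro j b h ht
    by_cases hj : j < copy.length
    · rw [cl2Inner, dif_pos hj]
      cases hbe : (li == copy[j]) with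
      | true =>
        have heq : li = copy[j] := by simpa using hbe
        have hmem : li ∈ copy := heq ▸ List.getElem_mem hj
        have hidx : copy.idxOf li = j := pvIdxOf_eq li copy j hj ht heq.symm
        have hrem : (PySem.List.remove? copy copy[j]).getD copy = copy.erase li := by
          rw [← heq, PySem.List.remove?_eq_some_erase copy li hmem]
          rfl
        have hsplit : copy = copy.take j ++ li :: copy.drop (j+1) := by
          conv_lhs => rw [← List.take_append_drop j copy]
          rw [List.drop_eq_getElem_cons hj, ← heq]
        have herase : copy.erase li = copy.take j ++ copy.drop (j+1) := by
          conv_lhs => rw [hsplit]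
          rw [List.erase_append_right _ ht, List.erase_cons_head]
        have hdrop2 : (copy.erase li).drop (j+1) = copy.drop (j+2) := by
          have hlen : (copy.take j).length = j := List.length_take_of_le (by omega)
          rw [herase, show j + 1 = (copy.take j).length + 1 from by rw [hlen],
            pvDropApp, List.drop_drop, hlen]
        cases hb2 : b
        · simp only [hbe, Bool.not_false, Bool.and_true, if_true, Bool.true_and,
            Bool.false_eq_true, if_false, if_pos hmem, hidx]
          rw [hrem, cl2Inner_found, hdrop2]
        · simp only [hbe, Bool.not_false, Bool.and_true, if_true, if_pos hmem, hidx]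
          rw [hrem]
          simp
      | false =>
        have hne : li ≠ copy[j] := by simpa using hbe
        have ht' : li ∉ copy.take (j+1) := by
          rw [List.take_succ, List.getElem?_eq_getElem hj]
          simp only [List.mem_append, not_or]
          exact ⟨ht, by simp [hne]⟩
        have hrec := ih (j+1) b (by omega) ht'
        simp [hbe, hrec]
    · rw [cl2Inner, dif_neg hj, if_neg (by
        rw [List.take_of_length_le (by omega)] at ht
        exact ht)]

theorem cl2Outer_eq_S (l1 : List Int) : ∀ copy b, cl2Outer l1 copy b = cl2S l1 copy b := by
  induction l1 with
  | nil => intro copy b; rfl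
  | cons li rest ih =>
    intro copy b
    rw [cl2Outer, cl2Inner_char li copy 0 b (by simp)]
    by_cases hm : li ∈ copy
    · rw [if_pos hm]
      simp only [Bool.not_true, Bool.false_eq_true, if_false]
      rw [ih, cl2S, if_pos hm]
    · rw [if_neg hm]
      simp only [Bool.not_false, if_true]
      rw [cl2S, if_neg hm]

theorem pvIdxOf_append (v : Int) (as bs : List Int) (h : v ∉ as) :
    (as ++ v :: bs).idxOf v = as.length := by
  induction as with
  | nil => simp
  | cons a t ih =>
    have hav : a ≠ v := fun hh => h (by simp [hh])
    rw [List.cons_append, List.idxOf_cons_ne _ hav, ih (fun hm => h (by simp [hm]))]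
    rfl

theorem pvCountEraseSub (rest copy : List Int) (li : Int)
    (h : ∀ x, (li :: rest).count x ≤ copy.count x) :
    ∀ x, rest.count x ≤ (copy.erase li).count x := by
  intro x
  have hx := h x
  rw [List.count_cons] at hx
  rw [List.count_erase]
  by_cases hxe : x = li
  · subst hxe
    simp only [beq_iff_eq, if_pos rfl] at hx ⊢
    omega
  · simp only [beq_iff_eq, if_neg hxe, if_neg (fun hh : li = x => hxe hh.symm)] at hx ⊢
    omega

theorem cl2S_true (l1 : List Int) :
    ∀ copy, (∀ x, l1.count x ≤ copy.count x) → cl2S l1 copy true = 2 := by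
  induction l1 with
  | nil => intro copy _; rfl
  | cons li rest ih =>
    intro copy h
    have hm : li ∈ copy := by
      rw [← List.count_pos_iff]
      have := h li
      rw [List.count_cons_self] at this
      omega
    rw [cl2S, if_pos hm]
    simp only [Bool.true_or]
    exact ih _ (pvCountEraseSub rest copy li h)

theorem cl2S_zero (l1 : List Int) :
    ∀ copy b, (∃ x ∈ l1, copy.count x < l1.count x) → cl2S l1 copy b = 0 := by
  induction l1 with
  | nil => intro copy b h; simp at h
  | cons li rest ih =>
    intro copy b h
    obtain ⟨x, hx, hcnt⟩ := h
    by_cases hm : li ∈ copy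
    · rw [cl2S, if_pos hm]
      apply ih
      by_cases hxl : x = li
      · subst hxl
        rw [List.count_cons_self] at hcnt
        have hrest : 1 ≤ rest.count x := by
          have : 1 ≤ copy.count x := List.count_pos_iff.mpr hm
          omega
        refine ⟨x, List.count_pos_iff.mp (by omega), ?_⟩
        rw [List.count_erase_self]
        omega
      · have hxr : x ∈ rest := by
          rcases List.mem_cons.mp hx with h1 | h2
          · exact absurd h1 hxl
          · exact h2
        refine ⟨x, hxr, ?_⟩
        rw [List.count_erase_of_ne hxl]
        rwa [List.count_cons_of_ne (Ne.symm hxl)] at hcnt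
    · rw [cl2S, if_neg hm]

-- ----- the duplicate-flag analysis -----

-- 'did A's inner scan ever see a second copy of the current value beyond the slot that
-- slid into the removed position'
def trigRec : List Int → List Int → Bool
  | [], _ => false
  | x :: rest, c => (decide (x ∈ c.drop (c.idxOf x + 2))) || trigRec rest (c.erase x)

-- cutl cnt l removes, for every value v, the first cnt v occurrences of v from l
def cutl (cnt : Int → Nat) : List Int → List Int
  | [] => []
  | e :: rest =>
    if cnt e = 0 then e :: cutl cnt rest
    else cutl (fun v => if v = e then cnt v - 1 else cnt v) rest

theorem cutl_zero (l : List Int) : cutl (fun _ => 0) l = l := by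
  induction l with
  | nil => rfl
  | cons e rest ih => simp [cutl, ih]

theorem cutl_sublist (cnt : Int → Nat) (l : List Int) : (cutl cnt l).Sublist l := by
  induction l generalizing cnt with
  | nil => simp [cutl]
  | cons e rest ih =>
    rw [cutl]
    split_ifs
    · exact (ih cnt).cons₂ e
    · exact (ih _).cons e

theorem cutl_count (cnt : Int → Nat) (l : List Int) (v : Int) :
    (cutl cnt l).count v = l.count v - cnt v := by
  induction l generalizing cnt with
  | nil => simp [cutl]
  | cons e rest ih =>
    rw [cutl]
    split_ifs with h0
    · simp only [List.count_cons, ih cnt, beq_iff_eq]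
      by_cases hv : e = v
      · subst hv; simp only [if_pos rfl, if_true]; omega
      · simp only [if_neg hv]; omega
    · rw [ih]
      simp only [List.count_cons, beq_iff_eq]
      by_cases hv : e = v
      · subst hv; simp only [if_pos rfl, if_true]; omega
      · simp only [if_neg hv, if_neg (fun h : v = e => hv h.symm)]; omega

theorem cutl_congr (cnt1 cnt2 : Int → Nat) (l : List Int)
    (h : ∀ e ∈ l, cnt1 e = cnt2 e) : cutl cnt1 l = cutl cnt2 l := by
  induction l generalizing cnt1 cnt2 with
  | nil => rfl
  | cons e rest ih =>
    have he := h e (by simp)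
    rw [cutl, cutl, he]
    split_ifs with h0
    · rw [ih _ _ (fun f hf => h f (by simp [hf]))]
    · apply ih
      intro f hf
      by_cases hfe : f = e
      · subst hfe
        rw [if_pos rfl, if_pos rfl, he]
      · rw [if_neg hfe, if_neg hfe, h f (by simp [hf])]

theorem cutl_append (cnt : Int → Nat) (a b : List Int) :
    cutl cnt (a ++ b) = cutl cnt a ++ cutl (fun v => cnt v - a.count v) b := by
  induction a generalizing cnt with
  | nil =>
    rw [List.nil_append, cutl, List.nil_append,
      cutl_congr (fun v => cnt v - List.count v []) cnt b (by intro f _; simp)]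
  | cons e arest ih =>
    rw [List.cons_append, cutl, cutl]
    split_ifs with h0
    · rw [ih cnt, List.cons_append]
      have heq : cutl (fun v => cnt v - arest.count v) b
          = cutl (fun v => cnt v - (e :: arest).count v) b := by
        apply cutl_congr
        intro f _
        simp only [List.count_cons, beq_iff_eq]
        by_cases hfe : e = f
        · subst hfe; simp only [if_pos rfl, if_true]; omega
        · simp only [if_neg hfe]; omega
      rw [heq]
    · rw [ih]
      congr 1
      apply cutl_congr
      intro f _
      simp only [List.count_cons, beq_iff_eq]
      by_cases hfe : f = e
      · subst hfe; simp only [if_pos rfl, if_true]; omega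
      · simp only [if_neg hfe, if_neg (fun h : e = f => hfe h.symm)]; omega

theorem cutl_erase (cnt : Int → Nat) (l : List Int) (x : Int) :
    (cutl cnt l).erase x = cutl (fun v => if v = x then cnt v + 1 else cnt v) l := by
  induction l generalizing cnt with
  | nil => simp [cutl]
  | cons e rest ih =>
    rw [cutl]
    split_ifs with h0
    · by_cases hex : e = x
      · subst hex
        rw [List.erase_cons_head, cutl, if_neg (by simp)]
        apply cutl_congr
        intro f _
        by_cases hfe : f = e
        · subst hfe; simp
        · simp [hfe]
      · rw [List.erase_cons_tail (by simpa using hex), ih cnt, cutl,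
          if_pos (by simp [hex, h0])]
    · rw [ih, cutl, if_neg (by
        intro hc
        by_cases hex : e = x
        · rw [if_pos hex] at hc; omega
        · rw [if_neg hex] at hc; exact h0 hc)]
      apply cutl_congr
      intro f _
      by_cases hfx : f = x
      · by_cases hfe : f = e
        · subst hfx; subst hfe
          simp only [if_pos rfl, if_true]
          omega
        · subst hfx
          simp only [if_pos rfl, if_neg hfe]
      · by_cases hfe : f = e
        · subst hfe
          simp only [if_pos rfl, if_neg hfx]
        · simp only [if_neg hfx, if_neg hfe]

theorem cutl_nil_iff (cnt : Int → Nat) (l : List Int) :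
    cutl cnt l = [] ↔
      ∀ s ∈ List.range l.length, (l.take (s+1)).count (l.getD s 0) ≤ cnt (l.getD s 0) := by
  induction l generalizing cnt with
  | nil => simp [cutl]
  | cons e rest ih =>
    rw [cutl]
    split_ifs with h0
    · constructor
      · intro h; simp at h
      · intro h
        have h0' := h 0 (by simp)
        simp only [List.take_succ_cons, List.take_zero, List.getD_cons_zero,
          List.count_cons, beq_iff_eq, List.count_nil] at h0'
        split_ifs at h0' <;> omega
    · rw [ih]
      constructor
      · intro h s hs
        rw [List.mem_range, List.length_cons] at hs
        cases s with
        | zero =>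
          simp only [List.take_succ_cons, List.take_zero, List.getD_cons_zero,
            List.count_cons, beq_iff_eq, List.count_nil]
          split_ifs <;> omega
        | succ s =>
          have hr := h s (by rw [List.mem_range]; omega)
          simp only [List.take_succ_cons, List.getD_cons_succ, List.count_cons,
            beq_iff_eq] at hr ⊢
          by_cases hfe : rest.getD s 0 = e
          · rw [hfe] at hr ⊢
            rw [if_pos rfl] at hr
            rw [if_pos rfl]
            omega
          · rw [if_neg hfe] at hr
            rw [if_neg (fun hh => hfe hh.symm)]
            omega
      · intro h s hs
        rw [List.mem_range] at hs
        have hr := h (s+1) (by rw [List.mem_range, List.length_cons]; omega)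
        simp only [List.take_succ_cons, List.getD_cons_succ, List.count_cons,
          beq_iff_eq] at hr ⊢
        by_cases hfe : rest.getD s 0 = e
        · rw [hfe] at hr ⊢
          rw [if_pos rfl] at hr
          rw [if_pos rfl]
          omega
        · rw [if_neg (fun hh => hfe hh.symm)] at hr
          rw [if_neg hfe]
          omega

theorem pvSplitFirst (x : Int) (l : List Int) (h : x ∈ l) :
    ∃ u t, l = u ++ x :: t ∧ x ∉ u := by
  induction l with
  | nil => simp at h
  | cons a rest ih =>
    by_cases hax : a = x
    · exact ⟨[], rest, by simp [hax], by simp⟩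
    · have hxr : x ∈ rest := by
        rcases List.mem_cons.mp h with h1 | h2
        · exact absurd h1.symm hax
        · exact h2
      obtain ⟨u, t, hl, hu⟩ := ih hxr
      refine ⟨a :: u, t, by simp [hl], ?_⟩
      simp only [List.mem_cons, not_or]
      exact ⟨fun hh => hax hh.symm, hu⟩

-- (u ++ r).take u.length = u
theorem pvTakeApp (u r : List Int) : (u ++ r).take u.length = u := by
  induction u with
  | nil => simp
  | cons a t ih => simp [List.take_succ_cons, ih]

-- no second visible copy when at most one copy remains
theorem pvNoTrigOfCountLe (c : List Int) (x : Int) (h : c.count x ≤ 1) :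
    x ∉ c.drop (c.idxOf x + 2) := by
  intro hmem
  have hm : x ∈ c := List.drop_subset _ _ hmem
  obtain ⟨u, t, hc, hu⟩ := pvSplitFirst x c hm
  subst hc
  rw [pvIdxOf_append x u t hu,
    show u.length + 2 = (u ++ [x]).length + 1 by simp,
    show u ++ x :: t = (u ++ [x]) ++ t by simp, pvDropApp] at hmem
  have hxt : x ∈ t := List.drop_subset _ _ hmem
  have h2 : 2 ≤ (u ++ x :: t).count x := by
    rw [List.count_append, List.count_cons_self]
    have := List.count_pos_iff.mpr hxt
    omega
  omega

-- a second visible copy whenever at least three copies remain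
theorem pvTrigOfCount3 (c : List Int) (x : Int) (h : 3 ≤ c.count x) :
    x ∈ c.drop (c.idxOf x + 2) := by
  have hm : x ∈ c := List.count_pos_iff.mp (by omega)
  obtain ⟨u, t, hc, hu⟩ := pvSplitFirst x c hm
  subst hc
  rw [pvIdxOf_append x u t hu,
    show u.length + 2 = (u ++ [x]).length + 1 by simp,
    show u ++ x :: t = (u ++ [x]) ++ t by simp, pvDropApp]
  have hcu : u.count x = 0 := List.count_eq_zero_of_not_mem hu
  have ht2 : 2 ≤ t.count x := by
    rw [List.count_append, List.count_cons_self] at h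
    omega
  obtain ⟨v, w, htv, hv⟩ := pvSplitFirst x t (List.count_pos_iff.mp (by omega))
  subst htv
  have hw : x ∈ w := by
    rw [List.count_append, List.count_cons_self,
      List.count_eq_zero_of_not_mem hv] at ht2
    exact List.count_pos_iff.mp (by omega)
  cases v with
  | nil => simpa using hw
  | cons a v' => simp [hw]

-- consuming one more list1 element advances the canonical cut of list2
theorem pvEraseStep (p l2 : List Int) (x : Int) :
    (cutl (fun v => p.count v) l2).erase x = cutl (fun v => (p ++ [x]).count v) l2 := by
  rw [cutl_erase]
  apply cutl_congr
  intro f _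
  simp only [List.count_append, List.count_cons, List.count_nil, beq_iff_eq]
  split_ifs <;> omega

theorem pvNotMemCutl (cnt : Int → Nat) (l : List Int) (x : Int) (h : x ∉ l) :
    x ∉ cutl cnt l := fun hm => h ((cutl_sublist cnt l).subset hm)

-- proof-side name for the inner condition of D_: every element strictly between the
-- two occurrences of x in l2 is already consumed by the prefix p
def pvBetweenConsumed (x : Int) (p l2 : List Int) : Prop :=
  ∀ t ∈ List.range l2.length, (l2.take t).count x = 1 → l2.getD t 0 ≠ x →
    (l2.take (t+1)).count (l2.getD t 0) ≤ p.count (l2.getD t 0)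

theorem pvTakeAppEq (u r : List Int) (k : Nat) :
    (u ++ r).take (u.length + k) = u ++ r.take k := by
  induction u with
  | nil => simp
  | cons a t ih =>
    rw [List.cons_append, List.length_cons,
      show t.length + 1 + k = (t.length + k) + 1 from by omega,
      List.take_succ_cons, ih, List.cons_append]

theorem pvTakeAppLe (u r : List Int) (k : Nat) (h : k ≤ u.length) :
    (u ++ r).take k = u.take k := by
  induction u generalizing k with
  | nil =>
    simp at h
    simp [h]
  | cons a t ih =>
    cases k with
    | zero => simp
    | succ k' =>
      rw [List.cons_append, List.take_succ_cons, List.take_succ_cons,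
        ih k' (by simpa using h)]

theorem pvGetDApp (u r : List Int) (k : Nat) :
    (u ++ r).getD (u.length + k) 0 = r.getD k 0 := by
  induction u with
  | nil => simp
  | cons a t ih =>
    rw [List.cons_append, List.length_cons,
      show t.length + 1 + k = (t.length + k) + 1 from by omega,
      List.getD_cons_succ, ih]

theorem pvGetDAppLt (u r : List Int) (k : Nat) (h : k < u.length) :
    (u ++ r).getD k 0 = u.getD k 0 := by
  induction u generalizing k with
  | nil => simp at h
  | cons a t ih =>
    cases k with
    | zero => simp
    | succ k' =>
      rw [List.cons_append, List.getD_cons_succ, List.getD_cons_succ,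
        ih k' (by simpa using h)]

-- the inner condition of D_, localized to the segment between the two occurrences
theorem pvBetweenConsumed_decomp (x : Int) (p u v w : List Int) (hu : x ∉ u)
    (hv : x ∉ v) :
    pvBetweenConsumed x p (u ++ x :: (v ++ x :: w)) ↔
      ∀ s ∈ List.range v.length,
        u.count (v.getD s 0) + (v.take (s+1)).count (v.getD s 0)
          ≤ p.count (v.getD s 0) := by
  have hlen : (u ++ x :: (v ++ x :: w)).length = u.length + v.length + w.length + 2 := by
    simp
    omega
  have htake : ∀ s, s ≤ v.length →
      (u ++ x :: (v ++ x :: w)).take (u.length + 1 + s) = u ++ x :: v.take s := by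
    intro s hs
    rw [show u.length + 1 + s = u.length + (1 + s) from by omega, pvTakeAppEq,
      show (1 + s) = s + 1 from by omega, List.take_succ_cons,
      pvTakeAppLe v (x :: w) s hs]
  have hget : ∀ s, s < v.length →
      (u ++ x :: (v ++ x :: w)).getD (u.length + 1 + s) 0 = v.getD s 0 := by
    intro s hs
    rw [show u.length + 1 + s = u.length + (1 + s) from by omega, pvGetDApp,
      show (1 + s) = s + 1 from by omega, List.getD_cons_succ,
      pvGetDAppLt v (x :: w) s hs]
  constructor
  · intro h s hs
    rw [List.mem_range] at hs
    have hcnt : ((u ++ x :: (v ++ x :: w)).take (u.length + 1 + s)).count x = 1 := by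
      rw [htake s (by omega), List.count_append, List.count_cons_self,
        List.count_eq_zero_of_not_mem hu,
        List.count_eq_zero_of_not_mem (fun hm => hv (List.take_subset _ _ hm))]
    have hsv : v.getD s 0 ∈ v := by
      rw [List.getD_eq_getElem (hn := hs)]
      exact List.getElem_mem hs
    have hnx : v.getD s 0 ≠ x := fun he => hv (he ▸ hsv)
    have hne : (u ++ x :: (v ++ x :: w)).getD (u.length + 1 + s) 0 ≠ x := by
      rw [hget s hs]
      exact hnx
    have hr := h (u.length + 1 + s) (by rw [List.mem_range, hlen]; omega) hcnt hne
    rw [hget s hs, show u.length + 1 + s + 1 = u.length + 1 + (s + 1) from by omega,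
      htake (s+1) (by omega), List.count_append] at hr
    simp only [List.count_cons, beq_iff_eq,
      if_neg (fun hh : x = v.getD s 0 => hnx hh.symm)] at hr
    omega
  · intro h t ht hcnt hne
    rw [List.mem_range, hlen] at ht
    by_cases htle : t ≤ u.length
    · rw [pvTakeAppLe u _ t htle,
        List.count_eq_zero_of_not_mem (fun hm => hu (List.take_subset _ _ hm))] at hcnt
      omega
    · set s := t - u.length - 1 with hsdef
      have hts : t = u.length + 1 + s := by omega
      by_cases hsv : s < v.length
      · have hr := h s (by rw [List.mem_range]; omega)
        rw [hts, hget s hsv,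
          show u.length + 1 + s + 1 = u.length + 1 + (s + 1) from by omega,
          htake (s+1) (by omega), List.count_append]
        have hnx : v.getD s 0 ≠ x := by
          rw [hts, hget s hsv] at hne
          exact hne
        simp only [List.count_cons, beq_iff_eq,
          if_neg (fun hh : x = v.getD s 0 => hnx hh.symm)]
        omega
      · exfalso
        by_cases hseq : s = v.length
        · rw [hts, hseq] at hne
          apply hne
          have h1 : u.length + 1 + v.length = u.length + (v.length + 1) := by omega
          rw [h1, pvGetDApp, List.getD_cons_succ]
          have h2 : (v ++ x :: w).getD v.length 0 = (x :: w).getD 0 0 := by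
            have h3 := pvGetDApp v (x :: w) 0
            simpa using h3
          rw [h2, List.getD_cons_zero]
        · have hs2 : v.length + 1 ≤ s := by omega
          set k := s - v.length with hk
          rw [hts, show u.length + 1 + s = u.length + (1 + s) from by omega, pvTakeAppEq,
            show 1 + s = s + 1 from by omega, List.take_succ_cons, List.count_append,
            List.count_cons_self, show s = v.length + k from by omega, pvTakeAppEq,
            List.count_append] at hcnt
          have hxk : 1 ≤ ((x :: w).take k).count x := by
            rw [show k = (k - 1) + 1 from by omega, List.take_succ_cons,
              List.count_cons_self]
            omega
          omega

-- the trigger test at a step reading x, when x survives twice and the prefix consumed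
-- no x: it fires iff something still separates the two copies
theorem pvTrigIffCut2 (p u v w : List Int) (x : Int) (hp : p.count x = 0)
    (hu : x ∉ u) (hv : x ∉ v) (hw : x ∉ w) :
    (x ∈ (cutl (fun f => p.count f) (u ++ x :: (v ++ x :: w))).drop
        ((cutl (fun f => p.count f) (u ++ x :: (v ++ x :: w))).idxOf x + 2))
      ↔ cutl (fun f => p.count f - u.count f) v ≠ [] := by
  have hdec : cutl (fun f => p.count f) (u ++ x :: (v ++ x :: w))
      = cutl (fun f => p.count f) u
        ++ x :: (cutl (fun f => p.count f - u.count f) v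
        ++ x :: cutl (fun f => p.count f - u.count f - v.count f) w) := by
    rw [cutl_append]
    congr 1
    rw [cutl, if_pos (by simp [hp]), cutl_append]
    congr 2
    rw [cutl, if_pos (by simp [hp])]
  rw [hdec]
  have hU := pvNotMemCutl (fun f => p.count f) u x hu
  have hW := pvNotMemCutl (fun f => p.count f - u.count f - v.count f) w x hw
  rw [pvIdxOf_append x _ _ hU,
    show (cutl (fun f => p.count f) u).length + 2
        = (cutl (fun f => p.count f) u ++ [x]).length + 1 by simp,
    show cutl (fun f => p.count f) u
        ++ x :: (cutl (fun f => p.count f - u.count f) v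
        ++ x :: cutl (fun f => p.count f - u.count f - v.count f) w)
      = (cutl (fun f => p.count f) u ++ [x])
        ++ (cutl (fun f => p.count f - u.count f) v
        ++ x :: cutl (fun f => p.count f - u.count f - v.count f) w) by simp,
    pvDropApp]
  cases hVc : cutl (fun f => p.count f - u.count f) v with
  | nil =>
    simp only [List.nil_append, List.drop_succ_cons, List.drop_zero]
    constructor
    · intro hmem
      exact absurd hmem hW
    · intro hne
      exact absurd rfl hne
  | cons e v' =>
    simp only [List.cons_append, List.drop_succ_cons, List.drop_zero]
    constructor
    · intro _
      simp
    · intro _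
      exact List.mem_append.mpr (Or.inr List.mem_cons_self)

-- the trigger test in terms of the closed-form condition of D_
theorem pvTrigCut2 (p l2 : List Int) (x : Int) (hp : p.count x = 0)
    (h2 : l2.count x = 2) :
    (x ∈ (cutl (fun f => p.count f) l2).drop ((cutl (fun f => p.count f) l2).idxOf x + 2))
      ↔ ¬ pvBetweenConsumed x p l2 := by
  obtain ⟨u, t, hc, hu⟩ := pvSplitFirst x l2 (List.count_pos_iff.mp (by omega))
  subst hc
  have hcu : u.count x = 0 := List.count_eq_zero_of_not_mem hu
  have ht1 : t.count x = 1 := by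
    rw [List.count_append, List.count_cons_self] at h2
    omega
  obtain ⟨v, w, htv, hv⟩ := pvSplitFirst x t (List.count_pos_iff.mp (by omega))
  subst htv
  have hw : x ∉ w := by
    rw [List.count_append, List.count_cons_self,
      List.count_eq_zero_of_not_mem hv] at ht1
    exact List.count_eq_zero.mp (by omega)
  rw [pvTrigIffCut2 p u v w x hp hu hv hw]
  have hb : cutl (fun f => p.count f - u.count f) v = []
      ↔ pvBetweenConsumed x p (u ++ x :: (v ++ x :: w)) := by
    rw [cutl_nil_iff, pvBetweenConsumed_decomp x p u v w hu hv]
    refine forall_congr' (fun s => ?_)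
    refine imp_congr_right (fun hs => ?_)
    rw [List.mem_range] at hs
    have h1 : 1 ≤ (v.take (s+1)).count (v.getD s 0) := by
      rw [List.getD_eq_getElem (hn := hs)]
      refine List.count_pos_iff.mpr ?_
      have hlen : s < (v.take (s+1)).length := by
        rw [List.length_take]
        omega
      have hget : (v.take (s+1))[s] = v[s] := List.getElem_take
      exact hget ▸ List.getElem_mem hlen
    omega
  rw [ne_eq, hb]

theorem cutl_nilp (l : List Int) : cutl (fun v => ([] : List Int).count v) l = l := by
  rw [cutl_congr _ (fun _ => 0) l (by intro e _; simp), cutl_zero]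

-- A's loop result in terms of the trigger scan
theorem cl2S_eq_trig (l1 : List Int) :
    ∀ c, (∀ v, l1.count v ≤ c.count v) →
      cl2S l1 c false = if trigRec l1 c then 2 else 1 := by
  induction l1 with
  | nil =>
    intro c _
    rfl
  | cons x rest ih =>
    intro c h
    have hm : x ∈ c := by
      rw [← List.count_pos_iff]
      have := h x
      rw [List.count_cons_self] at this
      omega
    rw [cl2S, if_pos hm, trigRec]
    by_cases htr : x ∈ c.drop (c.idxOf x + 2)
    · rw [decide_eq_true htr]
      simp only [Bool.false_or, Bool.true_or, if_true]
      exact cl2S_true rest _ (pvCountEraseSub rest c x h)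
    · rw [decide_eq_false htr]
      simp only [Bool.false_or]
      exact ih _ (pvCountEraseSub rest c x h)

-- no trigger ever fires on the inputs D_ describes
theorem pvMissNoTrig (l2 : List Int) (l1c : List Int) :
    ∀ p : List Int,
      (∀ v, (p ++ l1c).count v ≤ l2.count v) →
      (∀ x ∈ p ++ l1c, 2 ≤ l2.count x →
        l2.count x = 2 ∧ pvBetweenConsumed x ((p ++ l1c).take ((p ++ l1c).idxOf x)) l2) →
      trigRec l1c (cutl (fun v => p.count v) l2) = false := by
  induction l1c with
  | nil =>
    intro p _ _
    rfl
  | cons x rest ih =>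
    intro p hsub hmiss
    rw [trigRec, Bool.or_eq_false_iff]
    have hpx : p.count x + 1 ≤ l2.count x := by
      have := hsub x
      rw [List.count_append, List.count_cons_self] at this
      omega
    constructor
    · rw [decide_eq_false_iff_not]
      by_cases h2 : 2 ≤ l2.count x
      · obtain ⟨hc2, hbet⟩ := hmiss x (by simp) h2
        by_cases hp0 : p.count x = 0
        · have hnp : x ∉ p := List.count_eq_zero.mp hp0
          rw [pvIdxOf_append x p rest hnp, pvTakeApp] at hbet
          intro hmem
          exact ((pvTrigCut2 p l2 x hp0 hc2).mp hmem) hbet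
        · apply pvNoTrigOfCountLe
          rw [cutl_count]
          omega
      · apply pvNoTrigOfCountLe
        rw [cutl_count]
        omega
    · rw [pvEraseStep]
      have hre : (p ++ [x]) ++ rest = p ++ x :: rest := by simp
      apply ih (p ++ [x])
      · intro v
        rw [hre]
        exact hsub v
      · intro y hy h2y
        rw [hre] at hy ⊢
        exact hmiss y hy h2y

-- the trigger fires as soon as one value violates D_'s condition, at its first reading
theorem pvNomissTrig (l2 : List Int) (l1c : List Int) :
    ∀ (p : List Int) (x : Int), x ∈ l1c → p.count x = 0 →
      2 ≤ l2.count x →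
      ¬(l2.count x = 2 ∧ pvBetweenConsumed x ((p ++ l1c).take ((p ++ l1c).idxOf x)) l2) →
      trigRec l1c (cutl (fun v => p.count v) l2) = true := by
  induction l1c with
  | nil =>
    intro p x hx
    simp at hx
  | cons y rest ih =>
    intro p x hx hp0 h2 hnot
    rw [trigRec, Bool.or_eq_true]
    by_cases hyx : y = x
    · left
      subst hyx
      rw [decide_eq_true_eq]
      have hnp : y ∉ p := List.count_eq_zero.mp hp0
      rw [pvIdxOf_append y p rest hnp, pvTakeApp] at hnot
      by_cases h3 : 3 ≤ l2.count y
      · apply pvTrigOfCount3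
        rw [cutl_count]
        omega
      · have hc2 : l2.count y = 2 := by omega
        exact (pvTrigCut2 p l2 y hp0 hc2).mpr (fun hb => hnot ⟨hc2, hb⟩)
    · right
      have hxr : x ∈ rest := by
        rcases List.mem_cons.mp hx with h1 | hr
        · exact absurd h1.symm hyx
        · exact hr
      rw [pvEraseStep]
      have hre : (p ++ [y]) ++ rest = p ++ y :: rest := by simp
      have hp0' : (p ++ [y]).count x = 0 := by
        have hxy : x ∉ [y] := by
          simp only [List.mem_singleton]
          exact fun h => hyx h.symm
        rw [List.count_append, hp0, List.count_eq_zero_of_not_mem hxy]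
      apply ih (p ++ [y]) x hxr hp0' h2
      rw [hre]
      exact hnot

-- B's value, in propositional form
theorem altChar (l1 l2 : List Int) :
    comparelists2_alt l1 l2 =
      if ∃ x ∈ l1, l2.count x < l1.count x then 0
      else if ∃ x ∈ l1, 2 ≤ l2.count x then 2 else 1 := by
  rw [comparelists2_alt]
  have hib : ((l1.any (fun x => decide (l2.count x < l1.count x))) = true)
      ↔ ∃ x ∈ l1, l2.count x < l1.count x := by
    simp [List.any_eq_true]
  have hik : ((l1.any (fun x => decide (2 ≤ l2.count x))) = true)
      ↔ ∃ x ∈ l1, 2 ≤ l2.count x := by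
    simp [List.any_eq_true]
  exact if_congr hib rfl (if_congr hik rfl rfl)

-- ===== VERDICT =====
theorem comparelists2_spec : Claim_unchanged_comparelists2 := by
  unfold Claim_unchanged_comparelists2
  intro l1 l2 _
  unfold Spec_comparelists2
  intro hnd
  rw [comparelists2, cl2Outer_eq_S, altChar]
  by_cases h0 : ∃ x ∈ l1, l2.count x < l1.count x
  · rw [if_pos h0]
    exact cl2S_zero l1 l2 false h0
  · rw [if_neg h0]
    push_neg at h0
    have hsub : ∀ v, l1.count v ≤ l2.count v := by
      intro v
      by_cases hv : v ∈ l1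
      · exact h0 v hv
      · rw [List.count_eq_zero_of_not_mem hv]
        omega
    rw [cl2S_eq_trig l1 l2 hsub]
    by_cases hdup : ∃ x ∈ l1, 2 ≤ l2.count x
    · rw [if_pos hdup]
      have hnm : ¬ ∀ x ∈ l1, 2 ≤ l2.count x →
          l2.count x = 2 ∧ pvBetweenConsumed x (l1.take (l1.idxOf x)) l2 :=
        fun hm => hnd ⟨h0, hdup, hm⟩
      push_neg at hnm
      obtain ⟨x, hx, h2x, himp⟩ := hnm
      have ht : trigRec l1 (cutl (fun v => ([] : List Int).count v) l2) = true := by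
        apply pvNomissTrig l2 l1 [] x hx (by simp) h2x
        simp only [List.nil_append]
        rintro ⟨he, hb⟩
        exact himp he hb
      rw [cutl_nilp] at ht
      rw [ht]
      rfl
    · rw [if_neg hdup]
      have htf : trigRec l1 (cutl (fun v => ([] : List Int).count v) l2) = false := by
        apply pvMissNoTrig l2 l1 []
        · intro v
          simpa using hsub v
        · intro x hx h2
          rw [List.nil_append] at hx
          exact absurd ⟨x, hx, h2⟩ hdup
      rw [cutl_nilp] at htf
      rw [htf]
      rfl

theorem comparelists2_changed : Claim_changed_comparelists2 := by
  unfold Claim_changed_comparelists2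
  refine ⟨by decide, by decide, ?_, by decide, by decide⟩
  show comparelists2 [1] [1, 1] = 1
  rw [comparelists2, cl2Outer_eq_S]
  decide

theorem comparelists2_tight : Claim_exact_comparelists2 := by
  unfold Claim_exact_comparelists2
  intro l1 l2 _ hd
  obtain ⟨hsubm, hdup, hmiss⟩ := hd
  have hsub : ∀ v, l1.count v ≤ l2.count v := by
    intro v
    by_cases hv : v ∈ l1
    · exact hsubm v hv
    · rw [List.count_eq_zero_of_not_mem hv]
      omega
  have h0 : ¬ ∃ x ∈ l1, l2.count x < l1.count x := by
    rintro ⟨x, hx, hlt⟩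
    have := hsubm x hx
    omega
  rw [comparelists2, cl2Outer_eq_S, altChar, if_neg h0, if_pos hdup,
    cl2S_eq_trig l1 l2 hsub]
  have htf : trigRec l1 (cutl (fun v => ([] : List Int).count v) l2) = false := by
    apply pvMissNoTrig l2 l1 []
    · intro v
      simpa using hsub v
    · intro x hx h2
      rw [List.nil_append] at hx ⊢
      exact hmiss x hx h2
  rw [cutl_nilp] at htf
  rw [htf]
  decide
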